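-- pv_equiv track=rewrite | github.com/MineaSolas/AutomatingColorRamps | ramp_analysis.py | remove_sub_ramps
-- ===== SOURCE A (Python) =====
-- def remove_sub_ramps(ramps):
--     to_remove = set()
--     for i, ramp_i in enumerate(ramps):
--         for j, ramp_j in enumerate(ramps):
--             if i == j or j in to_remove:
--                 continue
--             if is_subsequence(ramp_j, ramp_i) or is_subsequence(ramp_j[::-1], ramp_i):
--                 to_remove.add(j)
--
--     return [r for idx, r in enumerate(ramps) if idx not in to_remove]
--
-- def is_subsequence(sub, full):
--     sub_len = len(sub)
--     for i in range(len(full) - sub_len + 1):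
--         if all(sub[j] == full[i + j] for j in range(sub_len)):
--             return True
--     return False
-- ===== SOURCE B (Python) =====
-- def remove_sub_ramps(ramps):
--     # Stage 1: build an inverted index mapping every contiguous window of every
--     # ramp (as a tuple) to the set of ramp indices that contain it.
--     owners = {}
--     for i, r in enumerate(ramps):
--         t = tuple(r)
--         n = len(t)
--         for a in range(n + 1):
--             for b in range(a, n + 1):
--                 owners.setdefault(t[a:b], set()).add(i)
--     # Stage 2: keep a ramp iff no OTHER ramp contains it forwards or backwards.
--     out = []
--     for j, r in enumerate(ramps):
--         occ = owners.get(tuple(r), set()) | owners.get(tuple(r[::-1]), set())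
--         if all(i == j for i in occ):
--             out.append(r)
--     return out
-- ===== Notes on version B (the rewrite author's own statement) =====
-- stated objective: alternative
-- what changed: Replaces A's pairwise loop with naive per-pair window scans by a two-stage algorithm: first build an inverted index (hash dict) from every contiguous window of every ramp to the set of ramp indices containing it, then keep a ramp iff the owner sets of the ramp and of its reverse contain no other index - the inner pairwise substring scan disappears entirely.
import Mathlib
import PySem

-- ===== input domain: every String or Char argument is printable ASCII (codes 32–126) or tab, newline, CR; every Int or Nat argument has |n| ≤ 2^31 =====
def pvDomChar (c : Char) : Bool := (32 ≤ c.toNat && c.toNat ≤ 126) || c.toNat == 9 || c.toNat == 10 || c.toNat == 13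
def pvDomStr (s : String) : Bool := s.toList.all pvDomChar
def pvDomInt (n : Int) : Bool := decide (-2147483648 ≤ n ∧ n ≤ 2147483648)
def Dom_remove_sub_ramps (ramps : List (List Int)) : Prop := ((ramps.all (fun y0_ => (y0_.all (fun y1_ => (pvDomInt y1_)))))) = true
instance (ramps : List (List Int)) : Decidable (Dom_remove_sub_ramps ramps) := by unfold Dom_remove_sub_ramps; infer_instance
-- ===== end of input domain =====

-- B replaces A's pairwise loop with per-pair window scans by a two-stage algorithm: build an
-- inverted index from every contiguous window of every ramp to the set of owning ramp indices,
-- then keep a ramp iff its (and its reverse's) owner set contains no other index (objective: alternative).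

-- ===== PORT A =====
def is_subsequence (sub full : List Int) : Bool :=
  -- for i in range(len(full) - sub_len + 1): if all(sub[j] == full[i+j] ...): return True / return False
  (PySem.List.pyRange 0 ((full.length : Int) - (sub.length : Int) + 1) 1).any
    (fun i => (PySem.List.pyRange 0 (sub.length : Int) 1).all
      (fun j => PySem.List.pyGet? sub j == PySem.List.pyGet? full (i + j)))

def remove_sub_ramps (ramps : List (List Int)) : List (List Int) :=
  -- to_remove = set(); nested 'for i, ramp_i' / 'for j, ramp_j' loops over enumerate(ramps);
  -- ramp_j[::-1] is List.reverse
  let to_remove : PySem.Set Int :=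
    (PySem.List.enumerate ramps 0).foldl (fun tr p =>
      (PySem.List.enumerate ramps 0).foldl (fun tr q =>
        if p.1 == q.1 || PySem.Set.contains tr q.1 then tr
        else if is_subsequence q.2 p.2 || is_subsequence q.2.reverse p.2 then
          PySem.Set.add tr q.1
        else tr) tr) PySem.Set.empty
  -- [r for idx, r in enumerate(ramps) if idx not in to_remove]
  (PySem.List.enumerate ramps 0).foldl
    (fun acc p => if !(PySem.Set.contains to_remove p.1) then acc ++ [p.2] else acc) []

-- ===== PORT B =====
def buildOwners (ramps : List (List Int)) : PySem.Dict (List Int) (PySem.Set Int) :=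
  -- owners = {}; for i, r: for a in range(n+1): for b in range(a, n+1):
  --   owners.setdefault(t[a:b], set()).add(i)     -- = modify key with default empty set, add i
  (PySem.List.enumerate ramps 0).foldl (fun d p =>
    (PySem.List.pyRange 0 ((p.2.length : Int) + 1) 1).foldl (fun d a =>
      (PySem.List.pyRange a ((p.2.length : Int) + 1) 1).foldl (fun d b =>
        d.modify (PySem.List.slice p.2 (some a) (some b)) PySem.Set.empty
          (fun s => PySem.Set.add s p.1)) d) d) PySem.Dict.empty

def remove_sub_ramps_alt (ramps : List (List Int)) : List (List Int) :=
  let owners := buildOwners ramps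
  -- for j, r in enumerate(ramps): occ = owners.get(tuple(r), set()) | owners.get(tuple(r[::-1]), set())
  --   if all(i == j for i in occ): out.append(r)
  (PySem.List.enumerate ramps 0).foldl (fun out p =>
    let occ := PySem.Set.union (owners.getD p.2 PySem.Set.empty)
                               (owners.getD p.2.reverse PySem.Set.empty)
    if occ.all (fun i => i == p.1) then out ++ [p.2] else out) []

-- ===== PRECONDITION & SPEC =====
def Spec_remove_sub_ramps (ramps : List (List Int)) (out : List (List Int)) : Prop := out = remove_sub_ramps_alt ramps
instance (ramps : List (List Int)) (out : List (List Int)) : Decidable (Spec_remove_sub_ramps ramps out) := by unfold Spec_remove_sub_ramps; infer_instance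

-- ===== CLAIM (what is proved, stated in full; the proofs are below) =====
def Claim_equal_remove_sub_ramps : Prop := ∀ (ramps : List (List Int)), Dom_remove_sub_ramps ramps → Spec_remove_sub_ramps ramps (remove_sub_ramps ramps)

-- ===== LEMMAS AND PROOFS =====

-- A prefix at some admissible start offset is exactly the infix relation.
theorem exists_window_iff_infix (sub full : List Int) :
    (∃ i : Int, i ∈ PySem.List.pyRange 0 ((full.length : Int) - (sub.length : Int) + 1) 1 ∧
      sub <+: full.drop i.toNat) ↔ sub <:+: full := by
  constructor
  · rintro ⟨i, hi, hpre⟩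
    exact hpre.isInfix.trans (List.drop_suffix i.toNat full).isInfix
  · rintro ⟨s, t, hst⟩
    refine ⟨(s.length : Int), ?_, ?_⟩
    · rw [PySem.List.mem_pyRange_one]
      have : full.length = s.length + sub.length + t.length := by
        subst hst; simp; omega
      constructor <;> omega
    · have : full.drop s.length = sub ++ t := by
        subst hst; rw [List.append_assoc, List.drop_left]
      simp only [Int.toNat_natCast, this]
      exact List.prefix_append sub t

-- A's inner indexwise window check is "sub is a prefix of full.drop i".
theorem window_all_iff (sub full : List Int) (i : Int) (h0 : 0 ≤ i)
    (hin : i.toNat + sub.length ≤ full.length) :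
    ((PySem.List.pyRange 0 ((sub.length : Int)) 1).all
      (fun j => PySem.List.pyGet? sub j == PySem.List.pyGet? full (i + j))) = true
    ↔ sub <+: full.drop i.toNat := by
  rw [List.all_eq_true, List.prefix_iff_eq_take]
  constructor
  · intro hall
    apply List.ext_getElem
    · simp; omega
    · intro k hk1 hk2
      have hkm : k < sub.length := hk1
      have := hall (k : Int) (by rw [PySem.List.mem_pyRange_one]; constructor <;> omega)
      simp only [beq_iff_eq] at this
      have hik : i + (k : Int) = ((i.toNat + k : Nat) : Int) := by omega
      rw [hik, PySem.List.pyGet?_natCast, PySem.List.pyGet?_natCast] at this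
      have hs : sub[k]? = some sub[k] := List.getElem?_eq_getElem hkm
      have hf : full[i.toNat + k]? = some full[i.toNat + k] :=
        List.getElem?_eq_getElem (by omega)
      rw [hs, hf] at this
      simp only [Option.some.injEq] at this
      simp [List.getElem_take, List.getElem_drop, this]
  · intro htake j hj
    rw [PySem.List.mem_pyRange_one] at hj
    obtain ⟨jn, rfl⟩ : ∃ n : Nat, j = (n : Int) := ⟨j.toNat, by omega⟩
    have hjm : jn < sub.length := by omega
    have hik : i + (jn : Int) = ((i.toNat + jn : Nat) : Int) := by omega
    rw [hik, PySem.List.pyGet?_natCast, PySem.List.pyGet?_natCast]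
    have hs : sub[jn]? = some sub[jn] := List.getElem?_eq_getElem hjm
    have hf : full[i.toNat + jn]? = some full[i.toNat + jn] :=
      List.getElem?_eq_getElem (by omega)
    rw [hs, hf]
    have hpre : sub <+: full.drop i.toNat := by rw [List.prefix_iff_eq_take]; exact htake
    have := hpre.getElem (i := jn) hjm
    rw [List.getElem_drop] at this
    simp [this]

-- A's window scan decides the contiguous-sublist (infix) relation.
theorem is_subsequence_iff_infix (sub full : List Int) :
    is_subsequence sub full = true ↔ sub <:+: full := by
  rw [is_subsequence, List.any_eq_true, ← exists_window_iff_infix]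
  constructor
  · rintro ⟨i, hi, hall⟩
    have hb := hi
    rw [PySem.List.mem_pyRange_one] at hb
    exact ⟨i, hi, by
      rw [← window_all_iff sub full i hb.1 (by omega)]
      exact hall⟩
  · rintro ⟨i, hi, hpre⟩
    have hb := hi
    rw [PySem.List.mem_pyRange_one] at hb
    exact ⟨i, hi, by
      rw [window_all_iff sub full i hb.1 (by omega)]
      exact hpre⟩

-- Membership after A's inner j-loop (over an arbitrary suffix l of the enumeration).
theorem mem_innerFold (p : Int × List Int) (l : List (Int × List Int)) (tr : PySem.Set Int) (k : Int) :
    (k ∈ l.foldl (fun tr q =>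
        if p.1 == q.1 || PySem.Set.contains tr q.1 then tr
        else if is_subsequence q.2 p.2 || is_subsequence q.2.reverse p.2 then PySem.Set.add tr q.1
        else tr) tr)
    ↔ k ∈ tr ∨ ∃ q ∈ l, p.1 ≠ q.1 ∧
        (is_subsequence q.2 p.2 || is_subsequence q.2.reverse p.2) = true ∧ q.1 = k := by
  induction l generalizing tr with
  | nil => simp
  | cons q l ih =>
    rw [List.foldl_cons, ih]
    by_cases h1 : p.1 = q.1
    · simp [h1]
    · have h1' : (p.1 == q.1) = false := by simp [h1]
      by_cases h2 : q.1 ∈ tr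
      · rw [if_pos (by simp [h2])]
        simp only [List.mem_cons]
        constructor
        · rintro (h | ⟨q', hq', hc⟩)
          · exact Or.inl h
          · exact Or.inr ⟨q', Or.inr hq', hc⟩
        · rintro (h | ⟨q', (rfl | hq'), hne, hc, rfl⟩)
          · exact Or.inl h
          · exact Or.inl h2
          · exact Or.inr ⟨q', hq', hne, hc, rfl⟩
      · rw [if_neg (by simp [h1, h2])]
        by_cases h3 : (is_subsequence q.2 p.2 || is_subsequence q.2.reverse p.2) = true
        · rw [if_pos h3]
          simp only [List.mem_cons, PySem.Set.mem_add]
          constructor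
          · rintro (⟨h | rfl⟩ | ⟨q', hq', hc⟩)
            · exact Or.inl h
            · exact Or.inr ⟨q, Or.inl rfl, h1, h3, rfl⟩
            · exact Or.inr ⟨q', Or.inr hq', hc⟩
          · rintro (h | ⟨q', (rfl | hq'), hne, hc, rfl⟩)
            · exact Or.inl (Or.inl h)
            · exact Or.inl (Or.inr rfl)
            · exact Or.inr ⟨q', hq', hne, hc, rfl⟩
        · rw [if_neg h3]
          simp only [List.mem_cons]
          constructor
          · rintro (h | ⟨q', hq', hc⟩)
            · exact Or.inl h
            · exact Or.inr ⟨q', Or.inr hq', hc⟩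
          · rintro (h | ⟨q', (rfl | hq'), hne, hc, rfl⟩)
            · exact Or.inl h
            · exact absurd hc h3
            · exact Or.inr ⟨q', hq', hne, hc, rfl⟩

-- Membership in A's full to_remove set.
theorem mem_outerFold (E : List (Int × List Int)) (l : List (Int × List Int)) (tr : PySem.Set Int) (k : Int) :
    (k ∈ l.foldl (fun tr p => E.foldl (fun tr q =>
        if p.1 == q.1 || PySem.Set.contains tr q.1 then tr
        else if is_subsequence q.2 p.2 || is_subsequence q.2.reverse p.2 then PySem.Set.add tr q.1
        else tr) tr) tr)
    ↔ k ∈ tr ∨ ∃ p ∈ l, ∃ q ∈ E, p.1 ≠ q.1 ∧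
        (is_subsequence q.2 p.2 || is_subsequence q.2.reverse p.2) = true ∧ q.1 = k := by
  induction l generalizing tr with
  | nil => simp
  | cons p l ih =>
    rw [List.foldl_cons, ih, mem_innerFold]
    simp only [List.mem_cons]
    constructor
    · rintro ((h | hq) | ⟨p', hp', hrest⟩)
      · exact Or.inl h
      · exact Or.inr ⟨p, Or.inl rfl, hq⟩
      · exact Or.inr ⟨p', Or.inr hp', hrest⟩
    · rintro (h | ⟨p', (rfl | hp'), hrest⟩)
      · exact Or.inl (Or.inl h)
      · exact Or.inl (Or.inr hrest)
      · exact Or.inr ⟨p', hp', hrest⟩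

-- Entries of an enumeration are determined by their index.
theorem enumerate_fst_inj {ramps : List (List Int)} {x q : Int × List Int}
    (hx : x ∈ PySem.List.enumerate ramps 0) (hq : q ∈ PySem.List.enumerate ramps 0)
    (h : q.1 = x.1) : q = x := by
  rw [PySem.List.mem_enumerate_iff] at hx hq
  obtain ⟨kx, hkx, rfl⟩ := hx
  obtain ⟨kq, hkq, rfl⟩ := hq
  simp only [zero_add] at h ⊢
  have : kq = kx := by exact_mod_cast h
  subst this
  rfl

-- Membership in the owner set after a flat modify/add fold over a list of keys.
theorem getD_foldl_modify_add {β : Type} (L : List β) (keyf : β → List Int)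
    (d : PySem.Dict (List Int) (PySem.Set Int)) (i k : Int) (w : List Int) :
    (k ∈ (L.foldl (fun d x =>
        d.modify (keyf x) PySem.Set.empty (fun s => PySem.Set.add s i)) d).getD w PySem.Set.empty)
    ↔ k ∈ d.getD w PySem.Set.empty ∨ ((∃ x ∈ L, keyf x = w) ∧ k = i) := by
  induction L generalizing d with
  | nil => simp
  | cons x L ih =>
    rw [List.foldl_cons, ih, PySem.Dict.getD_modify]
    by_cases hxw : w = keyf x
    · subst hxw
      rw [if_pos rfl, PySem.Set.mem_add]
      constructor
      · rintro ((h | rfl) | ⟨⟨x', hx', hk'⟩, hki⟩)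
        · exact Or.inl h
        · exact Or.inr ⟨⟨x, List.mem_cons_self, rfl⟩, rfl⟩
        · exact Or.inr ⟨⟨x', List.mem_cons_of_mem _ hx', hk'⟩, hki⟩
      · rintro (h | ⟨⟨x', hx', hk'⟩, hki⟩)
        · exact Or.inl (Or.inl h)
        · rcases List.mem_cons.mp hx' with rfl | hx''
          · exact Or.inl (Or.inr hki)
          · exact Or.inr ⟨⟨x', hx'', hk'⟩, hki⟩
    · rw [if_neg hxw]
      constructor
      · rintro (h | ⟨⟨x', hx', hk'⟩, hki⟩)
        · exact Or.inl h
        · exact Or.inr ⟨⟨x', List.mem_cons_of_mem _ hx', hk'⟩, hki⟩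
      · rintro (h | ⟨⟨x', hx', hk'⟩, hki⟩)
        · exact Or.inl h
        · rcases List.mem_cons.mp hx' with rfl | hx''
          · exact absurd hk'.symm hxw
          · exact Or.inr ⟨⟨x', hx'', hk'⟩, hki⟩

-- Membership in the owner set after the double window loop of one ramp.
theorem getD_windowFold (r : List Int) (d : PySem.Dict (List Int) (PySem.Set Int))
    (i k : Int) (w : List Int) :
    (k ∈ ((PySem.List.pyRange 0 ((r.length : Int) + 1) 1).foldl (fun d a =>
        (PySem.List.pyRange a ((r.length : Int) + 1) 1).foldl (fun d b =>
          d.modify (PySem.List.slice r (some a) (some b)) PySem.Set.empty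
            (fun s => PySem.Set.add s i)) d) d).getD w PySem.Set.empty)
    ↔ k ∈ d.getD w PySem.Set.empty ∨
      ((∃ a ∈ PySem.List.pyRange 0 ((r.length : Int) + 1) 1,
        ∃ b ∈ PySem.List.pyRange a ((r.length : Int) + 1) 1,
          PySem.List.slice r (some a) (some b) = w) ∧ k = i) := by
  generalize hL : PySem.List.pyRange 0 ((r.length : Int) + 1) 1 = L
  clear hL
  induction L generalizing d with
  | nil => simp
  | cons a L ih =>
    rw [List.foldl_cons, ih,
      getD_foldl_modify_add (L := PySem.List.pyRange a ((r.length : Int) + 1) 1)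
        (keyf := fun b => PySem.List.slice r (some a) (some b))]
    simp only [List.mem_cons]
    constructor
    · rintro ((h | ⟨⟨b, hb, hsl⟩, rfl⟩) | ⟨⟨a', ha', b, hb, hsl⟩, rfl⟩)
      · exact Or.inl h
      · exact Or.inr ⟨⟨a, Or.inl rfl, b, hb, hsl⟩, rfl⟩
      · exact Or.inr ⟨⟨a', Or.inr ha', b, hb, hsl⟩, rfl⟩
    · rintro (h | ⟨⟨a', (rfl | ha'), b, hb, hsl⟩, rfl⟩)
      · exact Or.inl (Or.inl h)
      · exact Or.inl (Or.inr ⟨⟨b, hb, hsl⟩, rfl⟩)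
      · exact Or.inr ⟨⟨a', ha', b, hb, hsl⟩, rfl⟩

-- The windows generated by the double range loop are exactly the infixes of r.
theorem window_exists_iff_infix (r w : List Int) :
    (∃ a ∈ PySem.List.pyRange 0 ((r.length : Int) + 1) 1,
      ∃ b ∈ PySem.List.pyRange a ((r.length : Int) + 1) 1,
        PySem.List.slice r (some a) (some b) = w) ↔ w <:+: r := by
  constructor
  · rintro ⟨a, ha, b, hb, rfl⟩
    rw [PySem.List.mem_pyRange_one] at ha hb
    obtain ⟨an, rfl⟩ : ∃ n : Nat, a = (n : Int) := ⟨a.toNat, by omega⟩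
    obtain ⟨bn, rfl⟩ : ∃ n : Nat, b = (n : Int) := ⟨b.toNat, by omega⟩
    rw [PySem.List.slice_natCast]
    exact ((r.drop an).take_prefix _).isInfix.trans (List.drop_suffix an r).isInfix
  · rintro ⟨s, t, rfl⟩
    refine ⟨(s.length : Int), ?_, ((s.length + w.length : Nat) : Int), ?_, ?_⟩
    · rw [PySem.List.mem_pyRange_one]; simp only [List.length_append]; push_cast; omega
    · rw [PySem.List.mem_pyRange_one]; simp only [List.length_append]; push_cast; omega
    · rw [PySem.List.slice_natCast]
      have h1 : (s ++ w ++ t).drop s.length = w ++ t := by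
        rw [List.append_assoc, List.drop_left]
      rw [h1]
      simp

-- Membership in the owner sets accumulated over a list of enumerated ramps.
theorem getD_ownersFold (E : List (Int × List Int)) (d : PySem.Dict (List Int) (PySem.Set Int))
    (k : Int) (w : List Int) :
    (k ∈ (E.foldl (fun d p =>
        (PySem.List.pyRange 0 ((p.2.length : Int) + 1) 1).foldl (fun d a =>
          (PySem.List.pyRange a ((p.2.length : Int) + 1) 1).foldl (fun d b =>
            d.modify (PySem.List.slice p.2 (some a) (some b)) PySem.Set.empty
              (fun s => PySem.Set.add s p.1)) d) d) d).getD w PySem.Set.empty)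
    ↔ k ∈ d.getD w PySem.Set.empty ∨ ∃ p ∈ E, p.1 = k ∧ w <:+: p.2 := by
  induction E generalizing d with
  | nil => simp
  | cons p E ih =>
    rw [List.foldl_cons, ih, getD_windowFold, window_exists_iff_infix]
    simp only [List.mem_cons]
    constructor
    · rintro ((h | ⟨hinf, rfl⟩) | ⟨p', hp', hk, hinf⟩)
      · exact Or.inl h
      · exact Or.inr ⟨p, Or.inl rfl, rfl, hinf⟩
      · exact Or.inr ⟨p', Or.inr hp', hk, hinf⟩
    · rintro (h | ⟨p', (rfl | hp'), hk, hinf⟩)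
      · exact Or.inl (Or.inl h)
      · exact Or.inl (Or.inr ⟨hinf, hk.symm⟩)
      · exact Or.inr ⟨p', hp', hk, hinf⟩

-- Characterisation of B's inverted index: k owns window w iff w is an infix of ramp k.
theorem mem_buildOwners (ramps : List (List Int)) (k : Int) (w : List Int) :
    (k ∈ (buildOwners ramps).getD w PySem.Set.empty)
    ↔ ∃ p ∈ PySem.List.enumerate ramps 0, p.1 = k ∧ w <:+: p.2 := by
  rw [buildOwners, getD_ownersFold]
  simp

-- ===== VERDICT (by name: the statement is the Claim_ definition above) =====
theorem remove_sub_ramps_spec : Claim_equal_remove_sub_ramps := by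
  intro ramps _
  unfold Spec_remove_sub_ramps
  simp only [remove_sub_ramps, remove_sub_ramps_alt]
  rw [PySem.List.foldl_append_if, PySem.List.foldl_append_if, List.nil_append, List.nil_append]
  apply congrArg
  apply List.filter_congr
  intro x hx
  rw [Bool.eq_iff_iff, Bool.not_eq_eq_eq_not, Bool.not_true, ← Bool.not_eq_true,
    PySem.Set.contains_iff, mem_outerFold, List.all_eq_true]
  constructor
  · intro hnr i hi
    rw [PySem.Set.mem_union, mem_buildOwners, mem_buildOwners] at hi
    by_contra hne
    rw [beq_iff_eq] at hne
    apply hnr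
    rcases hi with ⟨p, hp, hpk, hinf⟩ | ⟨p, hp, hpk, hinf⟩
    · refine Or.inr ⟨p, hp, x, hx, by omega, ?_, rfl⟩
      rw [Bool.or_eq_true, is_subsequence_iff_infix]
      exact Or.inl hinf
    · refine Or.inr ⟨p, hp, x, hx, by omega, ?_, rfl⟩
      rw [Bool.or_eq_true, is_subsequence_iff_infix, is_subsequence_iff_infix]
      exact Or.inr hinf
  · rintro hall (h | ⟨p, hp, q, hq, hne, hc, hqx⟩)
    · simp [PySem.Set.empty] at h
    · have hqq := enumerate_fst_inj hx hq hqx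
      rw [hqq] at hc hne
      rw [Bool.or_eq_true, is_subsequence_iff_infix, is_subsequence_iff_infix] at hc
      have hmem : p.1 ∈ PySem.Set.union ((buildOwners ramps).getD x.2 PySem.Set.empty)
          ((buildOwners ramps).getD x.2.reverse PySem.Set.empty) := by
        rw [PySem.Set.mem_union, mem_buildOwners, mem_buildOwners]
        rcases hc with hc | hc
        · exact Or.inl ⟨p, hp, rfl, hc⟩
        · exact Or.inr ⟨p, hp, rfl, hc⟩
      have hx1 := hall p.1 hmem
      rw [beq_iff_eq] at hx1
      exact hne hx1
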